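-- pv_equiv track=rewrite | github.com/piper-of-dawn/CFAPractice | mcq/quiz/views.py | _score_and_streak
-- ===== SOURCE A (Python) =====
-- def _score_and_streak(answers):
--     # answers: list[bool] indicating correctness per question
--     score = sum(1 for a in answers if a)
--     # current streak: consecutive correct answers at the end
--     streak = 0
--     for a in reversed(answers):
--         if a:
--             streak += 1
--         else:
--             break
--     # longest streak (for display if needed)
--     longest = 0
--     cur = 0
--     for a in answers:
--         if a:
--             cur += 1
--             longest = max(longest, cur)
--         else:
--             cur = 0
--     return score, streak, longest
-- ===== SOURCE B (Python) =====
-- def _score_and_streak(answers):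
--     # one fused left-to-right pass: score, current run length, best run length;
--     # the trailing streak is simply the current run length at the end
--     score = cur = longest = 0
--     for a in answers:
--         if a:
--             score += 1
--             cur += 1
--             if cur > longest:
--                 longest = cur
--         else:
--             cur = 0
--     return score, cur, longest
-- ===== Notes on version B (the rewrite author's own statement) =====
-- stated objective: faster
-- what changed: Replaces A's three separate traversals (a counting generator, a reversed loop with break, and a run-length loop) by one fused forward pass whose final current-run length is the trailing streak (one traversal instead of three).
import Mathlib
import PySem

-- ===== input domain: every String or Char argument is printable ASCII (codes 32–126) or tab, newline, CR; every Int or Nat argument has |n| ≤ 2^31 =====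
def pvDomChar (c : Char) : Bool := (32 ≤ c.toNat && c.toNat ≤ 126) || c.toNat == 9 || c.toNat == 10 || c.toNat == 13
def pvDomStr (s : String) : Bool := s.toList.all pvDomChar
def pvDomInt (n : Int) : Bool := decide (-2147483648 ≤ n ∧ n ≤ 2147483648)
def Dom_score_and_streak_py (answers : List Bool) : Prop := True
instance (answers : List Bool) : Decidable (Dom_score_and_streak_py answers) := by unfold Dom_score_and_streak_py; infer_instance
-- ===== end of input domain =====

-- B fuses A's three traversals (count, reversed trailing-streak loop, run-length loop) into one forward pass (objective: simpler).

-- ===== PORT A =====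
-- the reversed-loop-with-break computing the trailing streak: walks answers.reverse, counts until the first False
def pvTrailA : List Bool → Int
  | [] => 0
  | a :: rest => if a then 1 + pvTrailA rest else 0

-- the forward loop maintaining (longest, cur)
def pvStepL (p : Int × Int) (a : Bool) : Int × Int :=
  if a then (max p.1 (p.2 + 1), p.2 + 1) else (p.1, 0)

def score_and_streak_py (answers : List Bool) : Int × Int × Int :=
  let score := answers.foldl (fun s a => if a then s + 1 else s) 0
  let streak := pvTrailA answers.reverse
  let p := answers.foldl pvStepL (0, 0)
  (score, streak, p.1)

-- ===== PORT B =====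
-- one fused pass over state (score, cur, longest); trailing streak = final cur
def pvStepB (st : Int × Int × Int) (a : Bool) : Int × Int × Int :=
  if a then (st.1 + 1, st.2.1 + 1, max st.2.2 (st.2.1 + 1)) else (st.1, 0, st.2.2)

def score_and_streak_py_alt (answers : List Bool) : Int × Int × Int :=
  let st := answers.foldl pvStepB (0, 0, 0)
  (st.1, st.2.1, st.2.2)

-- ===== PRECONDITION & SPEC =====
def Spec_score_and_streak_py (answers : List Bool) (out : Int × Int × Int) : Prop := out = score_and_streak_py_alt answers
instance (answers : List Bool) (out : Int × Int × Int) : Decidable (Spec_score_and_streak_py answers out) := by unfold Spec_score_and_streak_py; infer_instance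

-- ===== CLAIM (what is proved, stated in full; the proofs are below) =====
def Claim_equal_score_and_streak_py : Prop := ∀ (answers : List Bool), Dom_score_and_streak_py answers → Spec_score_and_streak_py answers (score_and_streak_py answers)

-- ===== LEMMAS AND PROOFS =====

-- joint invariant, by reverse induction: B's fused state over xs equals
-- (A's score over xs, A's trailing streak of xs, A's longest over xs), and
-- A's run-length loop carries the trailing streak in its second component.
theorem pv_inv (xs : List Bool) :
    xs.foldl pvStepB (0, 0, 0)
      = (xs.foldl (fun s a => if a then s + 1 else s) 0, pvTrailA xs.reverse, (xs.foldl pvStepL (0, 0)).1)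
    ∧ (xs.foldl pvStepL (0, 0)).2 = pvTrailA xs.reverse := by
  induction xs using List.reverseRecOn with
  | nil => simp [pvTrailA]
  | append_singleton ys a ih =>
    obtain ⟨h1, h2⟩ := ih
    cases a <;>
      simp [List.foldl_append, h1, h2, pvStepB, pvStepL, pvTrailA, max_comm, Int.add_comm]

-- ===== VERDICT (by name: the statement is the Claim_ definition above) =====
theorem score_and_streak_py_spec : Claim_equal_score_and_streak_py := by
  intro answers _
  unfold Spec_score_and_streak_py score_and_streak_py score_and_streak_py_alt
  simp [(pv_inv answers).1]
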